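-- pv_equiv track=rewrite | github.com/marq4/Random-Video-Clip-Generator | tests/test_videos_exist.py | transform_into_list_of_ids
-- ===== SOURCE A (Python) =====
-- def transform_into_list_of_ids(video_list: list) -> list:
--     """ Parse URLs into just the YouTube video ids. """
--     id_list = []
--     pattern = 'v='
--     for url in video_list:
--         parts = url.split(pattern, 1) # Split once.
--         if len(parts) > 1:
--             id_list.append(parts[1])
--         else:
--             # Invalid URL found.
--             return False
--     return id_list
-- ===== SOURCE B (Python) =====
-- def transform_into_list_of_ids(video_list: list) -> list:
--     """ Parse URLs into just the YouTube video ids. """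
--     if all('v=' in url for url in video_list):
--         return [url.split('v=', 1)[1] for url in video_list]
--     return False
-- ===== Notes on version B (the rewrite author's own statement) =====
-- stated objective: simpler
-- what changed: Replaces the guarded append-or-bail-midway loop with a validate-then-map decomposition: one full all('v=' in url) validation pass, then a separate comprehension mapping pass.
-- outside the precondition, e.g. on transform_into_list_of_ids(['no_id_here']): A returns False, B returns False
import Mathlib
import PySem

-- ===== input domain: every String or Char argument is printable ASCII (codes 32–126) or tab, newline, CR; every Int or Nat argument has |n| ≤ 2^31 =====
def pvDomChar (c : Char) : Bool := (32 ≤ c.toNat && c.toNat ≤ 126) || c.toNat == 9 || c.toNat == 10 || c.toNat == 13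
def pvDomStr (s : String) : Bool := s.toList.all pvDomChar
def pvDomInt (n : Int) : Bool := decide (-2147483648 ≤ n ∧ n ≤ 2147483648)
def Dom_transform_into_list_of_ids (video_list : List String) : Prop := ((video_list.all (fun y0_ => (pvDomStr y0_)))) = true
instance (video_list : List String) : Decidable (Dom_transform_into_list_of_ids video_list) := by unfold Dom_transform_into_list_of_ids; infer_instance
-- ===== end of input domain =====

-- B rewrites A's append-or-bail-midway loop as a validate-then-map decomposition (objective: simpler).
-- On inputs with a URL lacking 'v=' both Pythons return False (not a list); Pre_ excludes those.

-- ===== PORT A =====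
-- the loop: accumulate ids; Python returns False on an invalid URL — excluded by Pre_, junk [] here
def transformGoA : List String → List String → List String
  | id_list, [] => id_list
  | id_list, url :: rest =>
    let parts := (PySem.Str.splitMax? url "v=" 1).getD []
    if 1 < parts.length then
      transformGoA (id_list ++ [parts.getD 1 ""]) rest
    else
      []  -- Python: return False (not a List String); inputs reaching this are outside Pre_

def transform_into_list_of_ids (video_list : List String) : List String :=
  transformGoA [] video_list

-- ===== PORT B =====
def transform_into_list_of_ids_alt (video_list : List String) : List String :=
  if video_list.all (fun url => PySem.Str.isIn "v=" url) then
    video_list.map (fun url => ((PySem.Str.splitMax? url "v=" 1).getD []).getD 1 "")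
  else
    []  -- Python: return False (not a List String); inputs reaching this are outside Pre_

-- ===== PRECONDITION & SPEC =====
-- Pre_ excludes inputs containing a URL without 'v=': there both Pythons return False, which is not a List String.
def Pre_transform_into_list_of_ids (video_list : List String) : Prop :=
  ∀ url ∈ video_list, PySem.Str.isIn "v=" url = true
instance (video_list : List String) : Decidable (Pre_transform_into_list_of_ids video_list) := by
  unfold Pre_transform_into_list_of_ids; infer_instance

def pvWitness_transform_into_list_of_ids : List String := ["watch?v=abc", "v=xy"]

def Spec_transform_into_list_of_ids (video_list : List String) (out : List String) : Prop := out = transform_into_list_of_ids_alt video_list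
instance (video_list : List String) (out : List String) : Decidable (Spec_transform_into_list_of_ids video_list out) := by unfold Spec_transform_into_list_of_ids; infer_instance

-- ===== CLAIM (what is proved, stated in full; the proofs are below) =====
def Claim_equal_transform_into_list_of_ids : Prop := ∀ (video_list : List String), Dom_transform_into_list_of_ids video_list → Pre_transform_into_list_of_ids video_list → Spec_transform_into_list_of_ids video_list (transform_into_list_of_ids video_list)

-- ===== LEMMAS AND PROOFS =====

-- go always returns at least one more piece than the accumulator holds
theorem splitGo_len_ge (sep : List Char) (fuel : Nat) :
    ∀ (m : Nat) (l cur : List Char) (acc : List (List Char)),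
    acc.length + 1 ≤ (PySem.Chars.splitOnMax.go sep fuel m l cur acc).length := by
  induction fuel with
  | zero => intro m l cur acc; simp [PySem.Chars.splitOnMax.go]
  | succ fuel ih =>
    intro m l cur acc
    cases l with
    | nil => simp [PySem.Chars.splitOnMax.go]
    | cons c rest =>
      rw [PySem.Chars.splitOnMax.go]
      split
      · simp
      · split
        · have h1 := ih (m - 1) (List.drop sep.length (c :: rest)) [] (cur.reverse :: acc)
          have h2 : (cur.reverse :: acc).length = acc.length + 1 := by simp
          omega
        · exact ih m rest (c :: cur) acc

-- if sep occurs in l and the split budget is not exhausted, go produces at least two more pieces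
theorem splitGo_len_two (sep : List Char) (hsep : sep ≠ []) (fuel : Nat) :
    ∀ (m : Nat) (l cur : List Char) (acc : List (List Char)),
    m ≠ 0 → sep <:+: l → l.length < fuel →
    acc.length + 2 ≤ (PySem.Chars.splitOnMax.go sep fuel m l cur acc).length := by
  induction fuel with
  | zero => intro m l cur acc _ _ hlt; omega
  | succ fuel ih =>
    intro m l cur acc hm hinf hlt
    cases l with
    | nil => exact absurd (List.eq_nil_of_infix_nil hinf) hsep
    | cons c rest =>
      rw [PySem.Chars.splitOnMax.go]
      split
      · omega
      · split
        · have h1 := splitGo_len_ge sep fuel (m - 1) (List.drop sep.length (c :: rest)) [] (cur.reverse :: acc)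
          have h2 : (cur.reverse :: acc).length = acc.length + 1 := by simp
          omega
        · rename_i hnp
          have hinf' : sep <:+: rest := by
            rcases List.infix_cons_iff.mp hinf with h3 | h3
            · exact absurd (List.isPrefixOf_iff_prefix.mpr h3) (by simpa using hnp)
            · exact h3
          have := ih m rest (c :: cur) acc hm hinf' (by simp at hlt; omega)
          exact this

-- a URL containing "v=" splits (maxsplit 1) into more than one piece
theorem parts_len (url : String) (h : PySem.Str.isIn "v=" url = true) :
    1 < ((PySem.Str.splitMax? url "v=" 1).getD []).length := by
  have hinf : "v=".toList <:+: url.toList := by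
    have := PySem.Chars.isIn_iff_infix ("v=".toList) url.toList
    simp [PySem.Str.isIn] at h
    exact this.mp (by simpa using h)
  have h2 := splitGo_len_two "v=".toList (by decide) (url.toList.length + 1) 1
      url.toList [] [] (by decide) hinf (by omega)
  simp [PySem.Str.splitMax?, PySem.Chars.splitMax?, PySem.Chars.splitOnMax] at h2 ⊢
  simpa using h2

-- the loop over all-valid URLs is the accumulator followed by the map
theorem goA_eq_map (video_list : List String) :
    ∀ (acc : List String), (∀ url ∈ video_list, PySem.Str.isIn "v=" url = true) →
    transformGoA acc video_list
      = acc ++ video_list.map (fun url => ((PySem.Str.splitMax? url "v=" 1).getD []).getD 1 "") := by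
  induction video_list with
  | nil => intro acc _; simp [transformGoA]
  | cons url rest ih =>
    intro acc hall
    have hurl := hall url (by simp)
    rw [transformGoA]
    simp only [if_pos (parts_len url hurl)]
    rw [ih _ (fun u hu => hall u (by simp [hu]))]
    simp

-- ===== VERDICT (by name: the statement is the Claim_ definition above) =====
theorem transform_into_list_of_ids_spec : Claim_equal_transform_into_list_of_ids := by
  intro video_list _ hpre
  unfold Spec_transform_into_list_of_ids transform_into_list_of_ids transform_into_list_of_ids_alt
  rw [if_pos (by simpa [List.all_eq_true] using hpre)]
  simpa using goA_eq_map video_list [] hpre
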